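-- pv_equiv track=rewrite | github.com/Juan-Mateos/rwjf | notebooks/archive/preprocessing.py | rwjf_sent
-- ===== SOURCE A (Python) =====
-- def rwjf_sent(text):
--     """Remove first sentence of RWJF grants."""
--     txt = []
--     for sent in text.split('.'):
--         if ':' in sent:
--             txt.extend(sent.split(':'))
--         else:
--             txt.append(sent)
--     if len(txt) > 1:
--         return '. '.join(txt[1:])
--     else:
--         return ' '.join(txt)
-- ===== SOURCE B (Python) =====
-- def rwjf_sent(text):
--     """Remove first sentence of RWJF grants (single pass over characters)."""
--     tokens = []
--     cur = []
--     for ch in text: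
--         if ch == '.' or ch == ':':
--             tokens.append(''.join(cur))
--             cur = []
--         else:
--             cur.append(ch)
--     tokens.append(''.join(cur))
--     if len(tokens) > 1:
--         return '. '.join(tokens[1:])
--     return ' '.join(tokens)
-- ===== Notes on version B (the rewrite author's own statement) =====
-- stated objective: simpler
-- what changed: Replaces the nested split ('.'-split, then re-splitting ':'-containing pieces) with a single character-level pass that accumulates tokens over the combined delimiter set {'.',':'}.
import Mathlib
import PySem

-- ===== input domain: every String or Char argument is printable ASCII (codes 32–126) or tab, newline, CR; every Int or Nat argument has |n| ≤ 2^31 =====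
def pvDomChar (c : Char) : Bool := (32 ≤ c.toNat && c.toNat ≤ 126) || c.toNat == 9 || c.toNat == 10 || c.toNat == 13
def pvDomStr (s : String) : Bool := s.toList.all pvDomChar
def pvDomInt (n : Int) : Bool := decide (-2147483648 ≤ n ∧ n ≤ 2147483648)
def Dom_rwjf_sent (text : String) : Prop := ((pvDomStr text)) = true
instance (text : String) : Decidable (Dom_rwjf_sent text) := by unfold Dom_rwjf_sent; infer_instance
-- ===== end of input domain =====

-- B replaces A's nested split ('.'-split, then re-splitting ':'-containing pieces)
-- with a single character-level pass over the combined delimiter set {'.',':'} (simpler decomposition, same cost).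


-- ===== PORT A =====
-- txt = []; for sent in text.split('.'): if ':' in sent: txt.extend(sent.split(':')) else txt.append(sent)
def rwjf_sent (text : String) : String :=
  let txt : List (List Char) :=
    (PySem.Chars.splitOn text.toList ['.']).foldl
      (fun acc sent =>
        if PySem.Chars.isIn [':'] sent = true then acc ++ PySem.Chars.splitOn sent [':']
        else acc ++ [sent]) []
  if 1 < txt.length then String.ofList (PySem.Chars.join ['.', ' '] (txt.drop 1))
  else String.ofList (PySem.Chars.join [' '] txt)

-- ===== PORT B =====
-- one pass over the characters, accumulating (finished tokens, current token)
def rwjf_sent_alt (text : String) : String :=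
  let st : List (List Char) × List Char :=
    text.toList.foldl
      (fun p ch =>
        if ch = '.' ∨ ch = ':' then (p.1 ++ [p.2], [])
        else (p.1, p.2 ++ [ch]))
      ([], [])
  let tokens := st.1 ++ [st.2]
  if 1 < tokens.length then String.ofList (PySem.Chars.join ['.', ' '] (tokens.drop 1))
  else String.ofList (PySem.Chars.join [' '] tokens)

-- ===== PRECONDITION & SPEC =====
def Spec_rwjf_sent (text : String) (out : String) : Prop := out = rwjf_sent_alt text
instance (text : String) (out : String) : Decidable (Spec_rwjf_sent text out) := by unfold Spec_rwjf_sent; infer_instance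

-- ===== CLAIM (what is proved, stated in full; the proofs are below) =====
def Claim_equal_rwjf_sent : Prop := ∀ (text : String), Dom_rwjf_sent text → Spec_rwjf_sent text (rwjf_sent text)

-- ===== LEMMAS AND PROOFS =====

-- prepend a prefix to the first token of a (never empty) token list
def pvConsHead (p : List Char) : List (List Char) → List (List Char)
  | [] => [p]
  | t :: ts => (p ++ t) :: ts

-- reference single-character split
def pvSsplit (c : Char) : List Char → List (List Char)
  | [] => [[]]
  | a :: rest => if a = c then [] :: pvSsplit c rest else pvConsHead [a] (pvSsplit c rest)

-- split on either delimiter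
def pvSsplit2 : List Char → List (List Char)
  | [] => [[]]
  | a :: rest => if a = '.' ∨ a = ':' then [] :: pvSsplit2 rest else pvConsHead [a] (pvSsplit2 rest)

theorem pvSsplit_ne_nil (c : Char) (l : List Char) : pvSsplit c l ≠ [] := by
  cases l with
  | nil => simp [pvSsplit]
  | cons a rest =>
    simp only [pvSsplit]
    split
    · simp
    · cases h : pvSsplit c rest <;> simp [pvConsHead]

theorem pvSsplit2_ne_nil (l : List Char) : pvSsplit2 l ≠ [] := by
  cases l with
  | nil => simp [pvSsplit2]
  | cons a rest =>
    simp only [pvSsplit2]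
    split
    · simp
    · cases h : pvSsplit2 rest <;> simp [pvConsHead]

theorem pvConsHead_append (p : List Char) (s u : List (List Char)) (hs : s ≠ []) :
    pvConsHead p (s ++ u) = pvConsHead p s ++ u := by
  cases s with
  | nil => exact absurd rfl hs
  | cons t ts => simp [pvConsHead]

theorem pv_go_eq (c : Char) :
    ∀ (fuel : Nat) (l cur : List Char) (acc : List (List Char)), l.length < fuel →
      PySem.Chars.splitOn.go [c] fuel l cur acc = acc.reverse ++ pvConsHead cur.reverse (pvSsplit c l) := by
  intro fuel
  induction fuel with
  | zero => intro l cur acc h; omega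
  | succ n ih =>
    intro l cur acc h
    cases l with
    | nil => simp [PySem.Chars.splitOn.go, pvSsplit, pvConsHead]
    | cons a rest =>
      by_cases hac : a = c
      · subst hac
        have hpre : List.isPrefixOf [a] (a :: rest) = true := by simp [List.isPrefixOf]
        rw [PySem.Chars.splitOn.go]
        simp only [hpre, if_true, List.length_cons, List.drop_succ_cons, List.length_nil,
          List.drop_zero]
        rw [ih rest [] (cur.reverse :: acc) (by simp at h; omega)]
        have h1 : pvSsplit a (a :: rest) = [] :: pvSsplit a rest := by simp [pvSsplit]
        rw [h1]
        have h0 : pvConsHead [] (pvSsplit a rest) = pvSsplit a rest := by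
          cases hs : pvSsplit a rest with
          | nil => exact absurd hs (pvSsplit_ne_nil a rest)
          | cons t ts => simp [pvConsHead]
        simp only [List.reverse_nil]
        rw [h0]
        simp [pvConsHead]
      · have hpre : List.isPrefixOf [c] (a :: rest) = false := by
          simp [List.isPrefixOf]
          exact fun hh => absurd hh.symm hac
        rw [PySem.Chars.splitOn.go]
        simp only [hpre, Bool.false_eq_true, if_false]
        rw [ih rest (a :: cur) acc (by simp at h ⊢; omega)]
        simp only [pvSsplit, if_neg hac, List.reverse_cons]
        cases hs : pvSsplit c rest with
        | nil => exact absurd hs (pvSsplit_ne_nil c rest)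
        | cons t ts => simp [pvConsHead]

theorem pv_splitOn_single (c : Char) (l : List Char) :
    PySem.Chars.splitOn l [c] = pvSsplit c l := by
  unfold PySem.Chars.splitOn
  rw [pv_go_eq c (l.length + 1) l [] [] (by omega)]
  cases hs : pvSsplit c l with
  | nil => exact absurd hs (pvSsplit_ne_nil c l)
  | cons t ts => simp [pvConsHead]

theorem pvSsplit_of_not_mem (c : Char) (l : List Char) (h : c ∉ l) : pvSsplit c l = [l] := by
  induction l with
  | nil => simp [pvSsplit]
  | cons a rest ih =>
    simp only [List.mem_cons, not_or] at h
    have hne : a ≠ c := fun hh => h.1 hh.symm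
    simp [pvSsplit, hne, ih h.2, pvConsHead]

theorem pv_flatMap_eq (l : List Char) :
    (pvSsplit '.' l).flatMap (pvSsplit ':') = pvSsplit2 l := by
  induction l with
  | nil => simp [pvSsplit, pvSsplit2]
  | cons a rest ih =>
    by_cases hdot : a = '.'
    · subst hdot
      simp [pvSsplit, pvSsplit2, ih]
    · by_cases hcol : a = ':'
      · subst hcol
        cases hs : pvSsplit '.' rest with
        | nil => exact absurd hs (pvSsplit_ne_nil _ _)
        | cons t ts =>
          have : pvSsplit2 (':' :: rest) = [] :: pvSsplit2 rest := by
            simp [pvSsplit2]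
          rw [this]
          simp only [pvSsplit, if_neg hdot, hs, pvConsHead, List.flatMap_cons]
          have hspl : pvSsplit ':' (':' :: t) = [] :: pvSsplit ':' t := by
            simp [pvSsplit]
          rw [show ([':'] ++ t) = ':' :: t from rfl, hspl]
          rw [← ih, hs]
          simp [List.flatMap_cons]
      · cases hs : pvSsplit '.' rest with
        | nil => exact absurd hs (pvSsplit_ne_nil _ _)
        | cons t ts =>
          have h2 : pvSsplit2 (a :: rest) = pvConsHead [a] (pvSsplit2 rest) := by
            simp [pvSsplit2, hdot, hcol]
          rw [h2]
          have h1 : pvSsplit '.' (a :: rest) = ([a] ++ t) :: ts := by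
            simp only [pvSsplit, if_neg hdot, hs, pvConsHead]
          rw [h1, List.flatMap_cons]
          have hspl : pvSsplit ':' (a :: t) = pvConsHead [a] (pvSsplit ':' t) := by
            simp [pvSsplit, hcol]
          rw [show ([a] ++ t) = a :: t from rfl, hspl,
            ← pvConsHead_append [a] (pvSsplit ':' t) _ (pvSsplit_ne_nil _ _),
            ← List.flatMap_cons, ← hs, ih]

theorem pv_a_foldl (l : List (List Char)) (acc : List (List Char)) :
    l.foldl
      (fun acc sent =>
        if PySem.Chars.isIn [':'] sent = true then acc ++ PySem.Chars.splitOn sent [':']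
        else acc ++ [sent]) acc = acc ++ l.flatMap (pvSsplit ':') := by
  induction l generalizing acc with
  | nil => simp
  | cons s rest ih =>
    simp only [List.foldl_cons, List.flatMap_cons]
    by_cases h : PySem.Chars.isIn [':'] s = true
    · rw [if_pos h, ih, pv_splitOn_single, List.append_assoc]
    · rw [if_neg h, ih]
      have hmem : (':' : Char) ∉ s := by
        have := (PySem.Chars.isIn_eq_false_iff [':'] s).mp (by simpa using h)
        intro hm
        exact this ((List.singleton_infix_iff _ _).mpr hm)
      rw [pvSsplit_of_not_mem _ _ hmem, List.append_assoc]

theorem pv_b_foldl (l : List Char) :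
    ∀ (toks : List (List Char)) (cur : List Char),
      (l.foldl
        (fun p ch =>
          if ch = '.' ∨ ch = ':' then (p.1 ++ [p.2], ([] : List Char))
          else (p.1, p.2 ++ [ch])) (toks, cur)).1 ++
      [(l.foldl
        (fun p ch =>
          if ch = '.' ∨ ch = ':' then (p.1 ++ [p.2], ([] : List Char))
          else (p.1, p.2 ++ [ch])) (toks, cur)).2] = toks ++ pvConsHead cur (pvSsplit2 l) := by
  induction l with
  | nil => intro toks cur; simp [pvSsplit2, pvConsHead]
  | cons a rest ih =>
    intro toks cur
    by_cases h : a = '.' ∨ a = ':'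
    · simp only [List.foldl_cons, if_pos h]
      rw [ih (toks ++ [cur]) []]
      have : pvSsplit2 (a :: rest) = [] :: pvSsplit2 rest := by simp [pvSsplit2, h]
      rw [this]
      have hne := pvSsplit2_ne_nil rest
      cases hs : pvSsplit2 rest with
      | nil => exact absurd hs hne
      | cons t ts => simp [pvConsHead]
    · simp only [List.foldl_cons, if_neg h]
      rw [ih toks (cur ++ [a])]
      have : pvSsplit2 (a :: rest) = pvConsHead [a] (pvSsplit2 rest) := by
        simp [pvSsplit2, h]
      rw [this]
      cases hs : pvSsplit2 rest with
      | nil => exact absurd hs (pvSsplit2_ne_nil rest)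
      | cons t ts => simp [pvConsHead]

-- ===== VERDICT (by name: the statement is the Claim_ definition above) =====
theorem rwjf_sent_spec : Claim_equal_rwjf_sent := by
  intro text _
  unfold Spec_rwjf_sent rwjf_sent rwjf_sent_alt
  have hA : (PySem.Chars.splitOn text.toList ['.']).foldl
      (fun acc sent =>
        if PySem.Chars.isIn [':'] sent = true then acc ++ PySem.Chars.splitOn sent [':']
        else acc ++ [sent]) [] = pvSsplit2 text.toList := by
    rw [pv_a_foldl, pv_splitOn_single, pv_flatMap_eq]
    simp
  have hB := pv_b_foldl text.toList [] []
  simp only [pvConsHead, List.nil_append] at hB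
  have hB' : (text.toList.foldl
        (fun p ch =>
          if ch = '.' ∨ ch = ':' then (p.1 ++ [p.2], ([] : List Char))
          else (p.1, p.2 ++ [ch])) ([], [])).1 ++
      [(text.toList.foldl
        (fun p ch =>
          if ch = '.' ∨ ch = ':' then (p.1 ++ [p.2], ([] : List Char))
          else (p.1, p.2 ++ [ch])) ([], [])).2] = pvSsplit2 text.toList := by
    rw [pv_b_foldl]
    cases hs : pvSsplit2 text.toList with
    | nil => exact absurd hs (pvSsplit2_ne_nil _)
    | cons t ts => simp [pvConsHead]
  simp only [hA, hB']
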